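-- pv_equiv track=rewrite | github.com/TaterTotterson/Tater_Shop | cores/ai_task_core.py | _normalize_weekdays
-- ===== SOURCE A (Python) =====
-- from typing import Any, Dict, List, Optional, Tuple
--
-- def _as_int(value: Any, default: int = 0) -> int:
--     try:
--         return int(value)
--     except Exception:
--         return int(default)
--
-- def _normalize_weekdays(raw: Any) -> List[int]:
--     if not isinstance(raw, list):
--         return []
--     out: List[int] = []
--     for item in raw:
--         day = _as_int(item, -1)
--         if 0 <= day <= 6:
--             out.append(day)
--     if not out:
--         return []
--     return sorted(set(out))
-- ===== SOURCE B (Python) =====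
-- from typing import Any, List
--
-- def _as_int(value: Any, default: int = 0) -> int:
--     try:
--         return int(value)
--     except Exception:
--         return int(default)
--
-- def _normalize_weekdays(raw: Any) -> List[int]:
--     if not isinstance(raw, list):
--         return []
--     return [d for d in range(7) if any(_as_int(item, -1) == d for item in raw)]
-- ===== Notes on version B (the rewrite author's own statement) =====
-- stated objective: alternative
-- what changed: B keeps no accumulator, set or sort at all: it iterates the fixed output domain 0..6 in order and emits each weekday for which a scan of raw finds a matching converted item, whereas A filters raw into a list and then sorts its deduplicated set.
import Mathlib
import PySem

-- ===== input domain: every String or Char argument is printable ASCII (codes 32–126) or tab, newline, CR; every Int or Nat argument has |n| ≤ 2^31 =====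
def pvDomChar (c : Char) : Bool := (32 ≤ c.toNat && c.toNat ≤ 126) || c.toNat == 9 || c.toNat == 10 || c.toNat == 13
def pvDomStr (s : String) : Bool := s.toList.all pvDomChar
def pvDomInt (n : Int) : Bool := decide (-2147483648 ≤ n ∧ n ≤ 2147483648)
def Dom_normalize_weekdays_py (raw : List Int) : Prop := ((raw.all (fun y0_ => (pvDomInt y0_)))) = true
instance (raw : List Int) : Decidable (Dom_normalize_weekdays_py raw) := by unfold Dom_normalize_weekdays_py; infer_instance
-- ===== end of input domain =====

-- B keeps no accumulator, set or sort: it scans the fixed output domain 0..6 in order and emits each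
-- weekday some item of raw converts to, instead of A's filter-into-list then sorted(set(...)) (alternative).
-- ===== PORT A =====
-- Under the List Int domain the isinstance guard always passes and _as_int(item, -1) = item.
def normalize_weekdays_py (raw : List Int) : List Int :=
  let out := raw.foldl (fun out item =>
    let day := item
    if 0 ≤ day ∧ day ≤ 6 then out ++ [day] else out) []
  if out = [] then []
  else PySem.List.sorted (PySem.Set.ofList out) (fun x => x) false

-- ===== PORT B =====
-- Under the List Int domain _as_int(item, -1) = item, so the inner any-scan compares items directly.
def normalize_weekdays_py_alt (raw : List Int) : List Int :=
  (PySem.List.pyRange 0 7 1).filter (fun d => raw.any (fun item => item == d))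

-- ===== PRECONDITION & SPEC =====
def Spec_normalize_weekdays_py (raw : List Int) (out : List Int) : Prop := out = normalize_weekdays_py_alt raw
instance (raw : List Int) (out : List Int) : Decidable (Spec_normalize_weekdays_py raw out) := by unfold Spec_normalize_weekdays_py; infer_instance

-- ===== CLAIM (what is proved, stated in full; the proofs are below) =====
def Claim_equal_normalize_weekdays_py : Prop := ∀ (raw : List Int), Dom_normalize_weekdays_py raw → Spec_normalize_weekdays_py raw (normalize_weekdays_py raw)

-- ===== LEMMAS AND PROOFS =====

-- A's accumulating loop is filtering
theorem foldl_append_if_filter (p : Int → Prop) [DecidablePred p] (raw acc : List Int) :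
    raw.foldl (fun out d => if p d then out ++ [d] else out) acc = acc ++ raw.filter (fun d => decide (p d)) := by
  induction raw generalizing acc with
  | nil => simp
  | cons x xs ih =>
    simp only [List.foldl_cons, List.filter_cons]
    by_cases h : p x <;> simp [h, ih]

-- the sorted set of the filtered list equals B's ordered domain scan
theorem sorted_set_eq_domain_scan (raw : List Int) :
    PySem.List.sorted (PySem.Set.ofList (raw.filter (fun d => decide (0 ≤ d ∧ d ≤ 6)))) (fun x => x) false
      = (PySem.List.pyRange 0 7 1).filter (fun d => raw.any (fun item => item == d)) := by
  apply PySem.List.sorted_eq_of_perm_of_pairwise_lt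
  · rw [List.perm_ext_iff_of_nodup]
    · intro x
      simp only [List.mem_filter, PySem.List.mem_pyRange_one, List.any_eq_true, beq_iff_eq,
        PySem.Set.mem_ofList, decide_eq_true_eq]
      constructor
      · rintro ⟨⟨h0, h7⟩, i, hi, rfl⟩
        exact ⟨hi, h0, by omega⟩
      · rintro ⟨hx, h0, h6⟩
        exact ⟨⟨h0, by omega⟩, x, hx, rfl⟩
    · exact (PySem.List.nodup_pyRange_one 0 7).filter _
    · exact PySem.Set.nodup_ofList _
  · exact List.Pairwise.filter _ (PySem.List.pairwise_lt_pyRange_one 0 7)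

-- when no item is a valid weekday, the domain scan is empty too
theorem domain_scan_nil (raw : List Int)
    (h : raw.filter (fun d => decide (0 ≤ d ∧ d ≤ 6)) = []) :
    (PySem.List.pyRange 0 7 1).filter (fun d => raw.any (fun item => item == d)) = [] := by
  rw [List.filter_eq_nil_iff]
  intro d hd
  simp only [PySem.List.mem_pyRange_one] at hd
  intro hcon
  obtain ⟨i, hi, hie⟩ := List.any_eq_true.mp hcon
  have hid : i = d := by simpa using hie
  subst hid
  have : i ∈ raw.filter (fun d => decide (0 ≤ d ∧ d ≤ 6)) := by
    exact List.mem_filter.mpr ⟨hi, by simp; omega⟩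
  rw [h] at this
  simp at this

-- ===== VERDICT (by name: the statement is the Claim_ definition above) =====
theorem normalize_weekdays_py_spec : Claim_equal_normalize_weekdays_py := by
  intro raw _
  unfold Spec_normalize_weekdays_py normalize_weekdays_py normalize_weekdays_py_alt
  simp only []
  rw [foldl_append_if_filter (fun d => 0 ≤ d ∧ d ≤ 6) raw []]
  simp only [List.nil_append]
  by_cases h : raw.filter (fun d => decide (0 ≤ d ∧ d ≤ 6)) = []
  · rw [if_pos h, (domain_scan_nil raw h).symm]
  · rw [if_neg h, sorted_set_eq_domain_scan raw]
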